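-- pv_equiv track=rewrite | github.com/Akudaikon-NM/Akudaikon-Security-Assessment-Program | tools/pdf_to_module.py | _grab_block
-- ===== SOURCE A (Python) =====
-- from typing import List, Dict, Any, Optional
--
-- def _grab_block(text: str, start_label: str, next_labels: List[str]) -> str:
--     """
--     Returns text after `start_label` up to the earliest next label occurrence.
--     """
--     start_idx = text.find(start_label)
--     if start_idx == -1:
--         return ""
--     start_idx = start_idx + len(start_label)
--
--     # find the nearest next label after start_idx
--     candidates = []
--     for lab in next_labels:
--         j = text.find(lab, start_idx)
--         if j != -1:
--             candidates.append(j)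
--     end_idx = min(candidates) if candidates else len(text)
--     return text[start_idx:end_idx].strip()
-- ===== SOURCE B (Python) =====
-- def _grab_block(text, start_label, next_labels):
--     start_idx = text.find(start_label)
--     if start_idx == -1:
--         return ""
--     start_idx += len(start_label)
--     end_idx = len(text)
--     for i in range(start_idx, len(text)):
--         if any(text.startswith(lab, i) for lab in next_labels):
--             end_idx = i
--             break
--     return text[start_idx:end_idx].strip()
-- ===== Notes on version B (the rewrite author's own statement) =====
-- stated objective: alternative
-- what changed: Replaces the per-label find + min over candidate positions by a single left-to-right scan from start_idx that stops at the first position where any next label starts.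
import Mathlib
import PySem

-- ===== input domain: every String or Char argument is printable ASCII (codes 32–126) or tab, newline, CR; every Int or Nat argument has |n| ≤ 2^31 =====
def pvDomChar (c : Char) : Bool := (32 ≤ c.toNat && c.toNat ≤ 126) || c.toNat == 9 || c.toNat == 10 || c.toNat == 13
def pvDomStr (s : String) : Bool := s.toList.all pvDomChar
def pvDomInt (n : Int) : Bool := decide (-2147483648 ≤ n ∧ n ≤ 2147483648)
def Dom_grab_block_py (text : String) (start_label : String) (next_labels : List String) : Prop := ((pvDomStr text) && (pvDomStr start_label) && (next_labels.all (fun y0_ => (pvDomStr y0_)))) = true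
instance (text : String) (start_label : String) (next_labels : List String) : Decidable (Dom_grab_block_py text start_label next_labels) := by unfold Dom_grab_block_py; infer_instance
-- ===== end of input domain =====

-- B replaces A's per-label find + min over candidate positions by a single left-to-right
-- scan that stops at the first position where any next label starts (alternative decomposition).

-- ===== PORT A =====
def grab_block_py (text : String) (start_label : String) (next_labels : List String) : String :=
  let start_idx := PySem.Str.find text start_label
  if start_idx = -1 then ""
  else
    let s : Int := start_idx + (PySem.Str.len start_label : Int)
    let candidates := next_labels.foldl (fun acc lab =>
      let j := PySem.Str.findFrom text lab s
      if j ≠ -1 then acc ++ [j] else acc) ([] : List Int)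
    let end_idx : Int := match PySem.List.min? candidates (fun x => x) with
      | some m => m
      | none => (PySem.Str.len text : Int)
    PySem.Str.strip (PySem.Str.slice text (some s) (some end_idx))

-- ===== PORT B =====
-- the scan loop of Source B; 'text.startswith(lab, i)' for 0 ≤ i ≤ len(text) is exactly
-- 'PySem.Chars.startswith (t.drop i) lab' (prefix test at position i).
def pvScanEnd (t : List Char) (labs : List (List Char)) (stop : Nat) (i : Nat) : Nat :=
  if i < stop then
    if labs.any (fun lab => PySem.Chars.startswith (t.drop i) lab) then i
    else pvScanEnd t labs stop (i + 1)
  else stop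
termination_by stop - i

def grab_block_py_alt (text : String) (start_label : String) (next_labels : List String) : String :=
  let start_idx := PySem.Str.find text start_label
  if start_idx = -1 then ""
  else
    let s : Nat := start_idx.toNat + start_label.toList.length
    let end_idx := pvScanEnd text.toList (next_labels.map String.toList) text.toList.length s
    PySem.Str.strip (PySem.Str.slice text (some (s : Int)) (some (end_idx : Int)))

-- ===== PRECONDITION & SPEC =====
def Spec_grab_block_py (text : String) (start_label : String) (next_labels : List String) (out : String) : Prop := out = grab_block_py_alt text start_label next_labels
instance (text : String) (start_label : String) (next_labels : List String) (out : String) : Decidable (Spec_grab_block_py text start_label next_labels out) := by unfold Spec_grab_block_py; infer_instance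

-- ===== CLAIM (what is proved, stated in full; the proofs are below) =====
def Claim_equal_grab_block_py : Prop := ∀ (text : String) (start_label : String) (next_labels : List String), Dom_grab_block_py text start_label next_labels → Spec_grab_block_py text start_label next_labels (grab_block_py text start_label next_labels)

-- ===== LEMMAS AND PROOFS =====

theorem pvScanEnd_spec (t : List Char) (labs : List (List Char)) (stop i : Nat) (h : i ≤ stop) :
    i ≤ pvScanEnd t labs stop i ∧ pvScanEnd t labs stop i ≤ stop ∧
    (pvScanEnd t labs stop i < stop → labs.any (fun lab => PySem.Chars.startswith (t.drop (pvScanEnd t labs stop i)) lab) = true) ∧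
    (∀ j, i ≤ j → j < pvScanEnd t labs stop i → labs.any (fun lab => PySem.Chars.startswith (t.drop j) lab) = false) := by
  obtain ⟨n, hn⟩ : ∃ n, n = stop - i := ⟨_, rfl⟩
  induction n generalizing i with
  | zero =>
    have hi : ¬ i < stop := by omega
    rw [pvScanEnd, if_neg hi]
    exact ⟨h, le_refl _, by omega, fun j h1 h2 => by omega⟩
  | succ n ih =>
    have hi : i < stop := by omega
    rw [pvScanEnd, if_pos hi]
    by_cases hp : labs.any (fun lab => PySem.Chars.startswith (t.drop i) lab) = true
    · rw [if_pos hp]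
      exact ⟨le_refl _, le_of_lt hi, fun _ => hp, fun j h1 h2 => absurd h2 (by omega)⟩
    · rw [if_neg hp]
      have H := ih (i+1) (by omega) (by omega)
      refine ⟨by omega, H.2.1, H.2.2.1, ?_⟩
      intro j hj1 hj2
      rcases eq_or_lt_of_le hj1 with rfl | hlt
      · exact eq_false_of_ne_true hp
      · exact H.2.2.2 j (by omega) hj2

theorem pvScanEnd_eq (t : List Char) (labs : List (List Char)) (stop i e : Nat)
    (h1 : i ≤ e) (h2 : e ≤ stop)
    (h3 : e < stop → labs.any (fun lab => PySem.Chars.startswith (t.drop e) lab) = true)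
    (h4 : ∀ j, i ≤ j → j < e → labs.any (fun lab => PySem.Chars.startswith (t.drop j) lab) = false) :
    pvScanEnd t labs stop i = e := by
  have S := pvScanEnd_spec t labs stop i (le_trans h1 h2)
  rcases lt_trichotomy (pvScanEnd t labs stop i) e with hlt | heq | hgt
  · have hA := h4 _ S.1 hlt
    have hB := S.2.2.1 (by omega)
    simp [hA] at hB
  · exact heq
  · have hA := S.2.2.2 e h1 hgt
    have hB := h3 (by omega)
    simp [hA] at hB

-- a label that starts at position j ≥ s occurs somewhere in t.drop s
theorem pvInfix_of_prefix_drop {t l : List Char} {s j : Nat} (hsj : s ≤ j)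
    (hp : l <+: t.drop j) : l <:+: t.drop s := by
  have hdd : t.drop j = (t.drop s).drop (j - s) := by
    rw [List.drop_drop]; congr 1; omega
  rw [hdd] at hp
  exact hp.isInfix.trans (List.drop_suffix _ _).isInfix

theorem pvCandidates_eq (text : String) (next_labels : List String) (s : Int) :
    next_labels.foldl (fun acc lab =>
      let j := PySem.Str.findFrom text lab s
      if j ≠ -1 then acc ++ [j] else acc) ([] : List Int)
    = (next_labels.filter (fun lab => PySem.Str.findFrom text lab s ≠ -1)).map
        (fun lab => PySem.Str.findFrom text lab s) := by
  rw [show (fun (acc : List Int) lab => let j := PySem.Str.findFrom text lab s; if j ≠ -1 then acc ++ [j] else acc)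
      = (fun acc lab => if (fun lab => decide (PySem.Str.findFrom text lab s ≠ -1)) lab = true then acc ++ [(fun lab => PySem.Str.findFrom text lab s) lab] else acc) from by
    funext acc lab; simp]
  rw [PySem.List.foldl_append_if]
  simp

-- ===== VERDICT (by name: the statement is the Claim_ definition above) =====
theorem grab_block_py_spec : Claim_equal_grab_block_py := by
  intro text sl labs _
  unfold Spec_grab_block_py
  simp only [grab_block_py, grab_block_py_alt]
  by_cases hf : PySem.Str.find text sl = -1
  · rw [if_pos hf, if_pos hf]
  · rw [if_neg hf, if_neg hf]
    have hf0 : 0 ≤ PySem.Str.find text sl := by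
      have := PySem.Chars.neg_one_le_find text.toList sl.toList
      rw [PySem.Str.find_eq] at hf ⊢; omega
    have hfc : PySem.Str.find text sl = PySem.Chars.find text.toList sl.toList :=
      PySem.Str.find_eq text sl
    have hs : (PySem.Str.find text sl).toNat + sl.toList.length ≤ text.toList.length := by
      have hsp := PySem.Chars.find_spec (s := text.toList) (sub := sl.toList) (by rw [← hfc]; exact hf0)
      have hlen := hsp.1.length_le
      rw [List.length_drop] at hlen
      have hfl := PySem.Chars.find_le_length text.toList sl.toList
      rw [← hfc] at hfl
      omega
    set t := text.toList with ht
    set s : Nat := (PySem.Str.find text sl).toNat + sl.toList.length with hsdef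
    have hsa : PySem.Str.find text sl + (PySem.Str.len sl : Int) = (s : Int) := by
      rw [PySem.Str.len_eq]; omega
    rw [hsa, pvCandidates_eq]
    -- the findFrom bridge
    have hFF : ∀ lab : String, PySem.Str.findFrom text lab (s : Int) =
        PySem.Chars.findFrom t lab.toList (s : Int) := fun lab =>
      PySem.Str.findFrom_eq text lab (s : Int) none
    have hne_of_prefix : ∀ (lab : String) (j : Nat), s ≤ j → lab.toList <+: t.drop j →
        PySem.Str.findFrom text lab (s : Int) ≠ -1 := by
      intro lab j hsj hp heq
      rw [hFF] at heq
      exact ((PySem.Chars.findFrom_natCast_eq_neg_one_iff t lab.toList s hs).1 heq)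
        (pvInfix_of_prefix_drop hsj hp)
    rcases hmin : PySem.List.min? ((labs.filter (fun lab => PySem.Str.findFrom text lab (s:Int) ≠ -1)).map
        (fun lab => PySem.Str.findFrom text lab (s:Int))) (fun x => x) with _ | m
    · -- no candidate: every label is absent after s
      have hnil := (PySem.List.min?_eq_none_iff _ _).1 hmin
      have hall : ∀ lab ∈ labs, PySem.Str.findFrom text lab (s:Int) = -1 := by
        intro lab hlab
        by_contra hne
        have : lab ∈ labs.filter (fun lab => PySem.Str.findFrom text lab (s:Int) ≠ -1) :=
          List.mem_filter.2 ⟨hlab, by simpa using hne⟩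
        rw [List.map_eq_nil_iff.1 hnil] at this
        simp at this
      have hscan : pvScanEnd t (labs.map String.toList) t.length s = t.length := by
        apply pvScanEnd_eq _ _ _ _ _ hs (le_refl _) (by omega)
        intro j hj1 hj2
        by_contra hP
        rw [Bool.not_eq_false, List.any_eq_true] at hP
        obtain ⟨l, hl, hsw⟩ := hP
        obtain ⟨lab, hlab, rfl⟩ := List.mem_map.1 hl
        have hp := (PySem.Chars.startswith_iff _ _).1 hsw
        exact (hne_of_prefix lab j hj1 hp) (hall lab hlab)
      rw [hscan]
      show PySem.Str.strip (PySem.Str.slice text (some (s:Int)) (some (PySem.Str.len text))) = _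
      rw [PySem.Str.len_eq]
    · -- minimal candidate m: it is the first matching position
      obtain ⟨lab0, hlab0, hm⟩ := by
        have := PySem.List.min?_mem hmin
        simpa only [List.mem_map, List.mem_filter] using this
      have hne0 : PySem.Str.findFrom text lab0 (s:Int) ≠ -1 := by simpa using hlab0.2
      have hmins := PySem.List.min?_isMin hmin
      have hspec0 := PySem.Chars.findFrom_natCast_spec t lab0.toList s hs (by rw [← hFF]; exact hne0)
      rw [hFF] at hm
      have hm0 : (s : Int) ≤ m := by rw [← hm]; exact hspec0.1
      have hmlen : m ≤ (t.length : Int) := by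
        rw [← hm]
        rw [PySem.Chars.findFrom_natCast t lab0.toList s hs]
        have := PySem.Chars.find_le_length (t.drop s) lab0.toList
        rw [List.length_drop] at this
        split
        · omega
        · omega
      have hscan : pvScanEnd t (labs.map String.toList) t.length s = m.toNat := by
        apply pvScanEnd_eq _ _ _ _ _ (by omega) (by omega)
        · intro _
          rw [List.any_eq_true]
          refine ⟨lab0.toList, List.mem_map.2 ⟨lab0, hlab0.1, rfl⟩, ?_⟩
          rw [PySem.Chars.startswith_iff, ← hm]
          exact hspec0.2.1
        · intro j hj1 hj2
          by_contra hP
          rw [Bool.not_eq_false, List.any_eq_true] at hP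
          obtain ⟨l, hl, hsw⟩ := hP
          obtain ⟨lab, hlab, rfl⟩ := List.mem_map.1 hl
          have hp := (PySem.Chars.startswith_iff _ _).1 hsw
          have hne := hne_of_prefix lab j hj1 hp
          have hmem : PySem.Str.findFrom text lab (s:Int) ∈
              (labs.filter (fun lab => PySem.Str.findFrom text lab (s:Int) ≠ -1)).map
                (fun lab => PySem.Str.findFrom text lab (s:Int)) :=
            List.mem_map.2 ⟨lab, List.mem_filter.2 ⟨hlab, by simpa using hne⟩, rfl⟩
          have hle := hmins _ hmem
          have hspec := PySem.Chars.findFrom_natCast_spec t lab.toList s hs (by rw [← hFF]; exact hne)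
          have hFj : (PySem.Chars.findFrom t lab.toList (s:Int)).toNat ≤ j := by
            by_contra hgt
            exact hspec.2.2 j hj1 (by omega) hp
          rw [hFF] at hle
          omega
      rw [hscan]
      show PySem.Str.strip (PySem.Str.slice text (some (s:Int)) (some m)) = _
      have hm0' : (0:Int) ≤ m := le_trans (Int.natCast_nonneg s) hm0
      rw [Int.toNat_of_nonneg hm0']
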